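-- pv_equiv track=rewrite | github.com/Mr-Rajesh-108/problem_solving_DSA | Problem_of_Day/day_08/Count pairs Sum in matrices.py | count_pairs_sum
-- ===== SOURCE A (Python) =====
-- def count_pairs_sum(mat1, mat2, x):
--     n = len(mat1)
--
--     # Flatten mat2 into a set for quick lookup
--     elements_mat2 = set()
--     for row in mat2:
--         for val in row:
--             elements_mat2.add(val)
--
--     # Count pairs
--     count = 0
--     for row in mat1:
--         for val in row:
--             if (x - val) in elements_mat2:
--                 count += 1
--
--     return count
-- ===== SOURCE B (Python) =====
-- def count_pairs_sum(mat1, mat2, x):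
--     # sort-and-two-pointer: a = sorted values of mat1 (with duplicates, ascending),
--     # b = distinct values of mat2 sorted descending; sweep both once.
--     a = sorted(v for row in mat1 for v in row)
--     b = sorted({v for row in mat2 for v in row}, reverse=True)
--     i, j, cnt = 0, 0, 0
--     while i < len(a) and j < len(b):
--         s = a[i] + b[j]
--         if s == x:
--             run = i
--             while run < len(a) and a[run] == a[i]:
--                 run += 1
--             cnt += run - i
--             i = run
--             j += 1
--         elif s < x:
--             i += 1
--         else:
--             j += 1
--     return cnt
-- ===== Notes on version B (the rewrite author's own statement) =====
-- stated objective: alternative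
-- what changed: B replaces A's hash-set membership test per cell by a sort-and-two-pointer sweep: mat1's values sorted ascending and mat2's distinct values sorted descending are swept simultaneously, counting runs of equal values when the front elements sum to x.
import Mathlib
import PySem

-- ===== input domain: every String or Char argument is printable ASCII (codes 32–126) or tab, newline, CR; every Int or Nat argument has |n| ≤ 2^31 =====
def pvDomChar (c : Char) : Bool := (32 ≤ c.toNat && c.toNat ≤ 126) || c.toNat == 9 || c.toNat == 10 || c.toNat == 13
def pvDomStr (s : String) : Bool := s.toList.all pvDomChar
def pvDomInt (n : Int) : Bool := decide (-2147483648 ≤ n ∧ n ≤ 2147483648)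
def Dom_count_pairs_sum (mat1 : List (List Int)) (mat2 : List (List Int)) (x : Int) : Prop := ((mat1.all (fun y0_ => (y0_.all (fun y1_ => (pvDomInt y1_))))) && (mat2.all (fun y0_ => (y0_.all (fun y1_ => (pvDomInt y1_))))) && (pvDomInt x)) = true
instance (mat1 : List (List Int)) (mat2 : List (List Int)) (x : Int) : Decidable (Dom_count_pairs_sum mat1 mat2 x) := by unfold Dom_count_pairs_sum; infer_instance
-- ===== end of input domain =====

-- B replaces A's hash-set membership scan by a sort-and-two-pointer sweep: mat1's values sorted
-- ascending, mat2's distinct values sorted descending, one simultaneous pass (alternative algorithm).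


-- ===== PORT A =====
def count_pairs_sum (mat1 : List (List Int)) (mat2 : List (List Int)) (x : Int) : Int :=
  let _n := mat1.length
  -- flatten mat2 into a set, cell by cell
  let elements_mat2 : PySem.Set Int :=
    mat2.foldl (fun s row => row.foldl (fun s val => PySem.Set.add s val) s) PySem.Set.empty
  -- count pairs, cell by cell over mat1
  mat1.foldl (fun count row =>
    row.foldl (fun count val =>
      if PySem.Set.contains elements_mat2 (x - val) then count + 1 else count) count) 0

-- ===== PORT B =====
-- the outer 'while i < len(a) and j < len(b)' loop of Source B, as recursion on the two suffixes;
-- the inner 'while run < len(a) and a[run] == a[i]' run-counting loop is the takeWhile/dropWhile split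
def tpAux (x : Int) : List Int → List Int → Int
  | [], _ => 0
  | _ :: _, [] => 0
  | a :: as, b :: bs =>
    let s := a + b
    if s = x then
      ((as.takeWhile (fun v => v = a)).length + 1 : Int) + tpAux x (as.dropWhile (fun v => v = a)) bs
    else if s < x then
      tpAux x as (b :: bs)
    else
      tpAux x (a :: as) bs
termination_by A B => A.length + B.length
decreasing_by
  · have := List.length_dropWhile_le (fun v => v = a) as
    simp; omega
  · simp
  · simp

def count_pairs_sum_alt (mat1 : List (List Int)) (mat2 : List (List Int)) (x : Int) : Int :=
  let a := PySem.List.sorted (mat1.flatMap (fun row => row)) (fun v => v) false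
  let b := PySem.List.sorted (PySem.Set.ofList (mat2.flatMap (fun row => row))) (fun v => v) true
  tpAux x a b

-- ===== PRECONDITION & SPEC =====
def Spec_count_pairs_sum (mat1 : List (List Int)) (mat2 : List (List Int)) (x : Int) (out : Int) : Prop := out = count_pairs_sum_alt mat1 mat2 x
instance (mat1 : List (List Int)) (mat2 : List (List Int)) (x : Int) (out : Int) : Decidable (Spec_count_pairs_sum mat1 mat2 x out) := by unfold Spec_count_pairs_sum; infer_instance

-- ===== CLAIM =====
def Claim_equal_count_pairs_sum : Prop := ∀ (mat1 : List (List Int)) (mat2 : List (List Int)) (x : Int), Dom_count_pairs_sum mat1 mat2 x → Spec_count_pairs_sum mat1 mat2 x (count_pairs_sum mat1 mat2 x)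

-- ===== LEMMAS AND PROOFS =====

-- a nested per-row foldl is the foldl over the flattened cells
theorem nested_foldl_eq_flat {γ : Type} (m : List (List Int)) (g : γ → Int → γ) (init : γ) :
    m.foldl (fun a row => row.foldl g a) init = (m.flatMap (fun row => row)).foldl g init := by
  rw [List.foldl_flatMap]

-- KEY LEMMA: on an ascending A and a strictly descending B the two-pointer sweep counts exactly
-- the elements v of A whose complement x - v lies in B.
theorem tpAux_eq_countP (x : Int) (A B : List Int)
    (hA : A.Pairwise (· ≤ ·)) (hB : B.Pairwise (· > ·)) :
    tpAux x A B = (A.countP (fun v => decide ((x - v) ∈ B)) : Int) := by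
  revert hA hB
  fun_induction tpAux x A B with
  | case1 B => intro _ _; simp
  | case2 a as => intro _ _; simp
  | case3 a as b bs s hs ih =>
    intro hA hB
    rw [List.pairwise_cons] at hA hB
    obtain ⟨hAa, hA'⟩ := hA
    obtain ⟨hBb, hB'⟩ := hB
    -- b = x - a; split as into the run of a's and the strict tail
    have hb : b = x - a := by omega
    have htd : as.takeWhile (fun v => v = a) ++ as.dropWhile (fun v => v = a) = as :=
      List.takeWhile_append_dropWhile
    have hdgt : ∀ v ∈ as.dropWhile (fun v => v = a), a < v := by
      rcases hd : as.dropWhile (fun v => v = a) with _ | ⟨d0, d'⟩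
      · simp
      · have hd0ne : ¬ (d0 = a) := by
          have := List.head?_dropWhile_not (fun v => decide (v = a)) as
          rw [hd] at this; simpa using this
        have hd0mem : d0 ∈ as := by
          have : d0 ∈ as.dropWhile (fun v => v = a) := by rw [hd]; simp
          exact (List.dropWhile_sublist _).subset this
        have hd0gt : a < d0 := lt_of_le_of_ne (hAa d0 hd0mem) (Ne.symm hd0ne)
        have hdp : (as.dropWhile (fun v => v = a)).Pairwise (· ≤ ·) :=
          hA'.sublist (List.dropWhile_sublist _)
        rw [hd] at hdp
        rw [List.pairwise_cons] at hdp
        intro v hv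
        rcases List.mem_cons.mp hv with rfl | hv'
        · exact hd0gt
        · exact lt_of_lt_of_le hd0gt (hdp.1 v hv')
    have ihd := ih (hA'.sublist (List.dropWhile_sublist _)) hB'
    -- count over the drop part with b removed from the search list
    have hdrop : (as.dropWhile (fun v => v = a)).countP (fun v => decide ((x - v) ∈ b :: bs))
        = (as.dropWhile (fun v => v = a)).countP (fun v => decide ((x - v) ∈ bs)) := by
      apply List.countP_congr
      intro v hv
      have : x - v ≠ b := by have := hdgt v hv; omega
      simp [List.mem_cons, this]
    have htake : (as.takeWhile (fun v => v = a)).countP (fun v => decide ((x - v) ∈ b :: bs))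
        = (as.takeWhile (fun v => v = a)).length := by
      rw [List.countP_eq_length]
      intro v hv
      have hva : v = a := by
        have := List.mem_takeWhile_imp hv; simpa using this
      subst hva
      simp [List.mem_cons, hb]
    have hpa : (decide ((x - a) ∈ b :: bs)) = true := by simp [List.mem_cons, hb]
    rw [ihd, List.countP_cons, hpa]
    have hsplit : (as.takeWhile (fun v => v = a)).countP (fun v => decide ((x - v) ∈ b :: bs))
        + (as.dropWhile (fun v => v = a)).countP (fun v => decide ((x - v) ∈ b :: bs))
        = as.countP (fun v => decide ((x - v) ∈ b :: bs)) := by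
      rw [← List.countP_append, htd]
    rw [← hsplit, htake, hdrop]
    push_cast
    rw [if_pos rfl]
    omega
  | case4 a as b bs s hs hlt ih =>
    intro hA hB
    rw [List.pairwise_cons] at hA
    have hBb : ∀ w ∈ bs, b > w := (List.pairwise_cons.mp hB).1
    have hnot : ¬ ((x - a) ∈ b :: bs) := by
      intro hmem
      rcases List.mem_cons.mp hmem with h | h
      · omega
      · have := hBb _ h; omega
    rw [ih hA.2 hB, List.countP_cons]
    simp [hnot]
  | case5 a as b bs s hs hge ih =>
    intro hA hB
    have hBb' : bs.Pairwise (· > ·) := (List.pairwise_cons.mp hB).2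
    have hge' : ∀ v ∈ a :: as, x - v ≠ b := by
      intro v hv
      rcases List.mem_cons.mp hv with rfl | h
      · omega
      · have := (List.pairwise_cons.mp hA).1 v h; omega
    rw [ih hA hBb']
    congr 1
    apply List.countP_congr
    intro v hv
    simp [List.mem_cons, hge' v hv]

theorem count_pairs_sum_spec : Claim_equal_count_pairs_sum := by
  intro mat1 mat2 x _
  unfold Spec_count_pairs_sum count_pairs_sum count_pairs_sum_alt
  set flat1 := mat1.flatMap (fun row => row) with hflat1
  set flat2 := mat2.flatMap (fun row => row) with hflat2
  -- A's set-build is set(flat2)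
  have hset : mat2.foldl (fun s row => row.foldl (fun s val => PySem.Set.add s val) s) PySem.Set.empty
      = PySem.Set.ofList flat2 := by
    rw [nested_foldl_eq_flat, PySem.Set.ofList_eq_foldl]; rfl
  simp only [hset]
  -- A's side: per-cell count over flat1
  have hA : mat1.foldl (fun count row => row.foldl (fun count val =>
        if PySem.Set.contains (PySem.Set.ofList flat2) (x - val) then count + 1 else count) count) 0
      = (flat1.countP (fun v => PySem.Set.contains (PySem.Set.ofList flat2) (x - v)) : Int) := by
    rw [nested_foldl_eq_flat, PySem.List.foldl_if_add_one, zero_add]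
  rw [hA]
  -- B's side via the two-pointer lemma
  set sa := PySem.List.sorted flat1 (fun v => v) false with hsa
  set sb := PySem.List.sorted (PySem.Set.ofList flat2) (fun v => v) true with hsb
  have hsaP : sa.Pairwise (· ≤ ·) := by
    have := PySem.List.sorted_pairwise flat1 (fun v => v)
    simpa using this
  have hsbP : sb.Pairwise (· > ·) := by
    have h1 : sb.Pairwise (fun a b => b ≤ a) := by
      have := PySem.List.sorted_pairwise_rev (PySem.Set.ofList flat2) (fun v => v)
      simpa using this
    have h2 : sb.Nodup := by
      have hperm : sb.Perm (PySem.Set.ofList flat2) := PySem.List.sorted_perm _ _ _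
      exact hperm.nodup_iff.mpr (PySem.Set.nodup_ofList flat2)
    exact (h1.and h2).imp (fun h => lt_of_le_of_ne h.1 (Ne.symm h.2))
  rw [tpAux_eq_countP x sa sb hsaP hsbP]
  have hperm1 : sa.Perm flat1 := PySem.List.sorted_perm _ _ _
  rw [hperm1.countP_eq]
  congr 1
  apply List.countP_congr
  intro v _
  have hmem : (x - v) ∈ sb ↔ (x - v) ∈ PySem.Set.ofList flat2 := PySem.List.mem_sorted _ _ _ _
  simp [PySem.Set.contains_eq_listContains, hmem]
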